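-- pv_equiv track=rewrite | github.com/kipoha/exs-shell | exs_shell/ui/modules/center_tab/childs/old_metrics.py | _calc_cols
-- ===== SOURCE A (Python) =====
-- import math
--
-- h = 300
--
-- w = 700
--
-- MAIN_GRAPH_H = 100
--
-- PADDING = 6
--
-- def _calc_cols(n: int) -> int:
--     available_h = h - MAIN_GRAPH_H - PADDING * 4 - 24
--     best = 1
--     for cols in range(1, n + 1):
--         rows = math.ceil(n / cols)
--         if w // cols - PADDING >= 120 and available_h // rows - PADDING >= 40:
--             best = cols
--     return best
-- ===== SOURCE B (Python) =====
-- h = 300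
--
-- w = 700
--
-- MAIN_GRAPH_H = 100
--
-- PADDING = 6
--
-- def _calc_cols(n: int) -> int:
--     available_h = h - MAIN_GRAPH_H - PADDING * 4 - 24
--     max_cols = w // (120 + PADDING)          # widest grid the width condition allows
--     max_rows = available_h // (40 + PADDING) # tallest grid the height condition allows
--     c = min(n, max_cols)
--     if c >= 1 and -(-n // c) <= max_rows:    # ceil(n/c) rows must fit
--         return c
--     return 1
-- ===== Notes on version B (the rewrite author's own statement) =====
-- stated objective: faster
-- what changed: Replaces the O(n) scan over all candidate column counts by a closed-form computation: the width condition caps cols at w//(120+PADDING) and the height condition is monotone in cols, so the answer is min(n, max_cols) if it fits, else 1.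
import Mathlib
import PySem

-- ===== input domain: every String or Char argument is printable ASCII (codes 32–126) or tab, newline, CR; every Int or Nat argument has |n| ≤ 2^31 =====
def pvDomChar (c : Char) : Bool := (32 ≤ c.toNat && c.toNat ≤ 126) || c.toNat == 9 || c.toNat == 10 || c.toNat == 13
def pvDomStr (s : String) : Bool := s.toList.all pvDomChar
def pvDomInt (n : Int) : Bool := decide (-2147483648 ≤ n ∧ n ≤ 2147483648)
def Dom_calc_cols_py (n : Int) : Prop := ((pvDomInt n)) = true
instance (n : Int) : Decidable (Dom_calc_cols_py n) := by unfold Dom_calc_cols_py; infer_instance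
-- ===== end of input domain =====

-- B computes the best column count in closed form (width caps cols, height is monotone in cols) instead of A's O(n) scan.


-- ===== PORT A =====
-- math.ceil(n / cols) is ported as -((-n) // cols): exact on the domain |n| ≤ 2^31,
-- where the float quotient n/cols never rounds across an integer boundary.
def calc_cols_py (n : Int) : Int :=
  let available_h : Int := 300 - 100 - 6 * 4 - 24
  (PySem.List.pyRange 1 (n + 1) 1).foldl
    (fun best cols =>
      let rows := -(PySem.Int.floordiv (-n) cols)
      if PySem.Int.floordiv 700 cols - 6 ≥ 120 ∧ PySem.Int.floordiv available_h rows - 6 ≥ 40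
      then cols else best)
    1

-- ===== PORT B =====
def calc_cols_py_alt (n : Int) : Int :=
  let available_h : Int := 300 - 100 - 6 * 4 - 24
  let max_cols := PySem.Int.floordiv 700 (120 + 6)
  let max_rows := PySem.Int.floordiv available_h (40 + 6)
  let c := min n max_cols
  if 1 ≤ c ∧ -(PySem.Int.floordiv (-n) c) ≤ max_rows then c else 1

-- ===== PRECONDITION & SPEC =====
def Spec_calc_cols_py (n : Int) (out : Int) : Prop := out = calc_cols_py_alt n
instance (n : Int) (out : Int) : Decidable (Spec_calc_cols_py n out) := by unfold Spec_calc_cols_py; infer_instance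

-- ===== CLAIM (what is proved, stated in full; the proofs are below) =====
def Claim_equal_calc_cols_py : Prop := ∀ (n : Int), Dom_calc_cols_py n → Spec_calc_cols_py n (calc_cols_py n)

-- ===== LEMMAS AND PROOFS =====

-- If no element of the list passes the test, the fold keeps its initial value.
theorem pv_foldl_if_const (p : Int → Prop) [DecidablePred p]
    (l : List Int) (init : Int)
    (h : ∀ x ∈ l, ¬ p x) :
    l.foldl (fun b x => if p x then x else b) init = init := by
  induction l generalizing init with
  | nil => rfl
  | cons y ys ih =>
      simp only [List.foldl_cons]
      rw [if_neg (h y (List.mem_cons_self))]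
      exact ih init (fun x hx => h x (List.mem_cons_of_mem _ hx))

-- For n ≥ 16 every candidate fails: cols ≥ 6 fails the width test, cols ≤ 5 needs ≥ 4 rows.
theorem pv_cond_false (n cols : Int) (hn : 16 ≤ n) (h1 : 1 ≤ cols) :
    ¬ (PySem.Int.floordiv 700 cols - 6 ≥ 120 ∧
       PySem.Int.floordiv (300 - 100 - 6 * 4 - 24) (-(PySem.Int.floordiv (-n) cols)) - 6 ≥ 40) := by
  rintro ⟨hw, hh⟩
  have hc : 0 < cols := h1
  rw [ge_iff_le, le_sub_iff_add_le] at hw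
  rw [PySem.Int.le_floordiv_iff_mul_le hc] at hw
  -- 126 * cols ≤ 700 → cols ≤ 5
  have hc5 : cols ≤ 5 := by nlinarith
  -- rows = ceil(n/cols) ≥ 4
  set rows := -(PySem.Int.floordiv (-n) cols) with hrows
  have hr : 4 ≤ rows := by
    have := PySem.Int.neg_floordiv_neg_eq_iff_of_pos (a := n) (b := cols) (q := rows) hc
    have hq : (rows - 1) * cols < n ∧ n ≤ rows * cols := this.mp rfl
    nlinarith [hq.2]
  have hrpos : 0 < rows := by omega
  rw [ge_iff_le, le_sub_iff_add_le] at hh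
  rw [PySem.Int.le_floordiv_iff_mul_le hrpos] at hh
  -- 46 * rows ≤ 152 contradicts rows ≥ 4
  nlinarith

-- ===== VERDICT (by name: the statement is the Claim_ definition above) =====
theorem calc_cols_py_spec : Claim_equal_calc_cols_py := by
  intro n _
  unfold Spec_calc_cols_py
  show (PySem.List.pyRange 1 (n + 1) 1).foldl
      (fun best cols =>
        if PySem.Int.floordiv 700 cols - 6 ≥ 120 ∧
           PySem.Int.floordiv (300 - 100 - 6 * 4 - 24) (-(PySem.Int.floordiv (-n) cols)) - 6 ≥ 40
        then cols else best) 1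
    = if 1 ≤ min n (PySem.Int.floordiv 700 (120 + 6)) ∧
         -(PySem.Int.floordiv (-n) (min n (PySem.Int.floordiv 700 (120 + 6)))) ≤
           PySem.Int.floordiv (300 - 100 - 6 * 4 - 24) (40 + 6)
      then min n (PySem.Int.floordiv 700 (120 + 6)) else 1
  by_cases hle : n ≤ 0
  · rw [PySem.List.pyRange_one_eq_nil (by omega)]
    simp only [List.foldl_nil]
    rw [if_neg]
    simp only [not_and]
    intro h1c
    exact absurd (le_trans h1c (min_le_left n _)) (by omega)
  · rw [not_le] at hle
    by_cases hbig : 16 ≤ n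
    · rw [pv_foldl_if_const
        (fun cols => PySem.Int.floordiv 700 cols - 6 ≥ 120 ∧
          PySem.Int.floordiv (300 - 100 - 6 * 4 - 24) (-(PySem.Int.floordiv (-n) cols)) - 6 ≥ 40)
        _ 1
        (fun x hx => by
          rw [PySem.List.mem_pyRange_one] at hx
          exact pv_cond_false n x hbig hx.1)]
      rw [if_neg]
      rintro ⟨h1c, hrows⟩
      have hc : min n (PySem.Int.floordiv 700 (120 + 6)) = 5 := by
        have : PySem.Int.floordiv 700 (120 + 6) = 5 := by decide
        rw [this]; omega
      rw [hc] at hrows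
      have hq := (PySem.Int.neg_floordiv_neg_eq_iff_of_pos (a := n) (b := 5)
        (q := -(PySem.Int.floordiv (-n) 5)) (by norm_num)).mp rfl
      have hmr : PySem.Int.floordiv (300 - 100 - 6 * 4 - 24) (40 + 6) = 3 := by decide
      rw [hmr] at hrows
      omega
    · -- 1 ≤ n ≤ 15: finitely many cases, evaluate both sides
      interval_cases n <;> decide
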